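-- pv_equiv track=rewrite | github.com/hui0613/studyNote | 00-笔试/test.py | get_nums
-- ===== SOURCE A (Python) =====
-- def get_nums(n):
--     if n == 1:
--         return 0
--     if n == 2:
--         return 1
--     a = 1
--     b = 1
--     res = 0
--     sums = 2
--     pro_sums = 2
--     while sums < n:
--         res = a + b
--         sums += res
--         if sums >= n:
--             return pro_sums
--         pro_sums = sums
--         a = b
--         b = res
--     return pro_sums
-- ===== SOURCE B (Python) =====
-- def _largest_fib_upto(n, a, b):
--     # largest element of the Fibonacci run a, b, a+b, ... that is <= n
--     # (or a itself when already b > n)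
--     if b <= n:
--         return _largest_fib_upto(n, b, a + b)
--     return a
--
--
-- def get_nums(n):
--     # Running sums of Fibonacci numbers are themselves Fibonacci numbers minus 1,
--     # so recurse down the raw Fibonacci sequence 3, 5, 8, ... and subtract 1:
--     # no cumulative accumulator, no previous-sum bookkeeping, no mid-loop return.
--     if n == 1:
--         return 0
--     if n == 2:
--         return 1
--     return _largest_fib_upto(n, 3, 5) - 1
-- ===== Notes on version B (the rewrite author's own statement) =====
-- stated objective: simpler
-- what changed: B replaces A's iterative loop over cumulative Fibonacci sums (with accumulator, previous-sum variable and mid-loop early return) by a small recursion over raw Fibonacci terms, using the identity that running Fibonacci sums equal Fibonacci numbers minus 1; it returns the largest Fibonacci term <= n, minus 1.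
import Mathlib
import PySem

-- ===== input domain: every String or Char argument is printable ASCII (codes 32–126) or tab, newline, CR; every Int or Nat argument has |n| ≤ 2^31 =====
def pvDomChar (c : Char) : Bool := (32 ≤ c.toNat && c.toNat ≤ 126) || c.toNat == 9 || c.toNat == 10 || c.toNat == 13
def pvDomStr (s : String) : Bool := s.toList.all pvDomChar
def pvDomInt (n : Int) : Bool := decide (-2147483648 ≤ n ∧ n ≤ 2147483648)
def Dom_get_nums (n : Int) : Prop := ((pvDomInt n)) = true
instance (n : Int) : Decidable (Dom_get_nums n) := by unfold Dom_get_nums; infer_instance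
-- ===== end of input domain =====

-- B replaces A's cumulative-sum loop (accumulator, previous-sum variable, mid-loop
-- early return) by a recursion over raw Fibonacci terms, using running-sum = fib - 1.

-- ===== PORT A =====
-- A's while-loop: state (a, b, sums, pro_sums); terminates because sums strictly
-- grows (positivity of a and b is carried as proof arguments).
def loopA_get_nums (n a b sums pro : Int) (ha : 0 < a) (hb : 0 < b) : Int :=
  if sums < n then
    -- res = a + b; sums += res; if sums >= n: return pro_sums; pro_sums = sums; a = b; b = res
    if n ≤ sums + (a + b) then pro
    else loopA_get_nums n b (a + b) (sums + (a + b)) (sums + (a + b)) hb (by omega)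
  else pro
termination_by (n - sums).toNat
decreasing_by omega

def get_nums (n : Int) : Int :=
  if n = 1 then 0
  else if n = 2 then 1
  else loopA_get_nums n 1 1 2 2 (by norm_num) (by norm_num)

-- ===== PORT B =====
-- B's helper recursion; terminates because a strictly increases towards n
-- (the bundled hypothesis 0 < a ∧ a < b keeps the run strictly growing).
def largestFibUpto (n a b : Int) (h : 0 < a ∧ a < b) : Int :=
  if hb : b ≤ n then largestFibUpto n b (a + b) ⟨by omega, by omega⟩
  else a
termination_by (n - a).toNat
decreasing_by omega

def get_nums_alt (n : Int) : Int :=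
  if n = 1 then 0
  else if n = 2 then 1
  else largestFibUpto n 3 5 (by norm_num) - 1

-- ===== PRECONDITION & SPEC =====
def Spec_get_nums (n : Int) (out : Int) : Prop := out = get_nums_alt n
instance (n : Int) (out : Int) : Decidable (Spec_get_nums n out) := by unfold Spec_get_nums; infer_instance

-- ===== CLAIM (what is proved, stated in full; the proofs are below) =====
def Claim_equal_get_nums : Prop := ∀ (n : Int), Dom_get_nums n → Spec_get_nums n (get_nums n)

-- ===== LEMMAS AND PROOFS =====

-- Correspondence: A's state (a, b, s) with invariant s = a + 2b - 1 matches B's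
-- Fibonacci pair (a + 2b, 2a + 3b) — the running sum is always a Fibonacci term minus 1.
theorem loop_corr (n a b s : Int) (ha : 0 < a) (hb : 0 < b) (hinv : s = a + 2 * b - 1) :
    loopA_get_nums n a b s s ha hb
      = largestFibUpto n (a + 2 * b) (2 * a + 3 * b) (by omega) - 1 := by
  rw [loopA_get_nums]
  conv_rhs => rw [largestFibUpto]
  by_cases hs : s < n
  · rw [if_pos hs]
    by_cases hs' : n ≤ s + (a + b)
    · rw [if_pos hs', dif_neg (by omega : ¬ 2 * a + 3 * b ≤ n)]
      omega
    · rw [if_neg hs', dif_pos (by omega : 2 * a + 3 * b ≤ n)]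
      have := loop_corr n b (a + b) (s + (a + b)) hb (by omega) (by omega)
      rw [this]
      congr 2 <;> omega
  · rw [if_neg hs, dif_neg (by omega : ¬ 2 * a + 3 * b ≤ n)]
    omega
termination_by (n - s).toNat
decreasing_by omega

-- ===== VERDICT (by name: the statement is the Claim_ definition above) =====
theorem get_nums_spec : Claim_equal_get_nums := by
  intro n _
  unfold Spec_get_nums get_nums get_nums_alt
  split_ifs with h1 h2
  · rfl
  · rfl
  · have := loop_corr n 1 1 2 (by norm_num) (by norm_num) (by norm_num)
    rw [this]
    norm_num
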